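-- pv_equiv track=rewrite | github.com/dnviti/codeclaw | scripts/chunkers/python_chunker.py | _group_contiguous
-- ===== SOURCE A (Python) =====
-- def _group_contiguous(items: list[tuple[int, str]]) -> list[list[tuple[int, str]]]:
--     """Group (line_number, content) tuples into contiguous runs."""
--     if not items:
--         return []
--     groups: list[list[tuple[int, str]]] = [[items[0]]]
--     for item in items[1:]:
--         if item[0] == groups[-1][-1][0] + 1:
--             groups[-1].append(item)
--         else:
--             groups.append([item])
--     return groups
-- ===== SOURCE B (Python) =====
-- def _group_contiguous(items: list[tuple[int, str]]) -> list[list[tuple[int, str]]]: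
--     """Group (line_number, content) tuples into contiguous runs (break-index + slicing)."""
--     if not items:
--         return []
--     groups: list[list[tuple[int, str]]] = []
--     start = 0
--     for i in range(1, len(items)):
--         if items[i][0] != items[i - 1][0] + 1:
--             groups.append(items[start:i])
--             start = i
--     groups.append(items[start:])
--     return groups
-- ===== Notes on version B (the rewrite author's own statement) =====
-- stated objective: alternative
-- what changed: A grows the last group in place item by item; B makes one pass over indices recording contiguity-break positions and emits each run as a slice items[start:i], appending the final tail slice at the end.
import Mathlib
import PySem

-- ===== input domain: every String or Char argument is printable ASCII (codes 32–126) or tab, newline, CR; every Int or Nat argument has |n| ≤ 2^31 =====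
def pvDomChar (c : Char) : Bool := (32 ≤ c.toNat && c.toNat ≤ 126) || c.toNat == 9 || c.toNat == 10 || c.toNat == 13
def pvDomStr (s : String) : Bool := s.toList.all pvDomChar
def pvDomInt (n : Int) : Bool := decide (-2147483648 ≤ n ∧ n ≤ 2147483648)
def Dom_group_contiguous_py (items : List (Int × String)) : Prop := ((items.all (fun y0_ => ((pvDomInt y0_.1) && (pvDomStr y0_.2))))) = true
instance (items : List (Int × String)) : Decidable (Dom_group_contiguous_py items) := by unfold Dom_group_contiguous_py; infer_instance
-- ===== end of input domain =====

-- A = B everywhere; B replaces A's append-to-last-group accumulation by a one-pass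
-- break-index scan that emits each run as a slice items[start:i] (objective: alternative).

-- ===== PORT A =====
-- loop body of A: if item[0] == groups[-1][-1][0] + 1 append to the current (last) group,
-- else start a new group; state = (finished groups, current last group)
def pvStepA (s : List (List (Int × String)) × List (Int × String)) (item : Int × String) :
    List (List (Int × String)) × List (Int × String) :=
  if item.1 = (PySem.List.pyGetD s.2 (-1) ((0 : Int), "")).1 + 1 then (s.1, s.2 ++ [item])
  else (s.1 ++ [s.2], [item])

def group_contiguous_py (items : List (Int × String)) : List (List (Int × String)) :=
  match items with
  | [] => []
  | x :: rest =>
    let s := rest.foldl pvStepA ([], [x])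
    s.1 ++ [s.2]

-- ===== PORT B =====
-- loop body of B: at a contiguity break at index i, emit the slice items[start:i]; state = (groups, start)
def pvStepB (items : List (Int × String)) (s : List (List (Int × String)) × Int) (i : Int) :
    List (List (Int × String)) × Int :=
  if (PySem.List.pyGetD items i ((0 : Int), "")).1 ≠ (PySem.List.pyGetD items (i - 1) ((0 : Int), "")).1 + 1
  then (s.1 ++ [PySem.List.slice items (some s.2) (some i)], i)
  else s

def group_contiguous_py_alt (items : List (Int × String)) : List (List (Int × String)) :=
  if items.isEmpty then []
  else
    let s := (PySem.List.pyRange 1 (items.length : Int) 1).foldl (pvStepB items) ([], 0)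
    s.1 ++ [PySem.List.slice items (some s.2) none]

-- ===== PRECONDITION & SPEC =====
def Spec_group_contiguous_py (items : List (Int × String)) (out : List (List (Int × String))) : Prop := out = group_contiguous_py_alt items
instance (items : List (Int × String)) (out : List (List (Int × String))) : Decidable (Spec_group_contiguous_py items out) := by unfold Spec_group_contiguous_py; infer_instance

-- ===== CLAIM (what is proved, stated in full; the proofs are below) =====
def Claim_equal_group_contiguous_py : Prop := ∀ (items : List (Int × String)), Dom_group_contiguous_py items → Spec_group_contiguous_py items (group_contiguous_py items)

-- ===== LEMMAS AND PROOFS =====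

-- items[start:len(items)] = items[start:]
lemma pv_slice_full (items : List (Int × String)) (start : Int) (h0 : 0 ≤ start) :
    PySem.List.slice items (some start) (some (items.length : Int)) =
    PySem.List.slice items (some start) none := by
  rw [PySem.List.slice_toNat items h0 (by positivity), PySem.List.slice_from items h0]
  apply List.take_of_length_le
  simp [List.length_drop]

-- last element of the nonempty slice items[start:i] is items[i-1]
lemma pv_slice_getLast? (items : List (Int × String)) (start i : Int)
    (h0 : 0 ≤ start) (h1 : start < i) (h2 : i ≤ (items.length : Int)) :
    (PySem.List.slice items (some start) (some i)).getLast? = items[i.toNat - 1]? := by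
  rw [PySem.List.slice_toNat items h0 (by omega), List.getLast?_eq_getElem?]
  have hlen : ((items.drop start.toNat).take (i.toNat - start.toNat)).length
      = i.toNat - start.toNat := by
    simp [List.length_take, List.length_drop]; omega
  rw [hlen, List.getElem?_take_of_lt (by omega), List.getElem?_drop]
  congr 1
  omega

-- items[start:i] + [items[i]] = items[start:i+1]
lemma pv_slice_extend (items : List (Int × String)) (start i : Int)
    (h0 : 0 ≤ start) (h1 : start ≤ i) (hlt : i.toNat < items.length) :
    PySem.List.slice items (some start) (some i) ++ [items[i.toNat]] =
    PySem.List.slice items (some start) (some (i + 1)) := by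
  rw [PySem.List.slice_toNat items h0 (by omega), PySem.List.slice_toNat items h0 (by omega)]
  have h3 : (i + 1).toNat - start.toNat = (i.toNat - start.toNat) + 1 := by omega
  rw [h3, List.take_add_one, List.getElem?_drop]
  have h4 : start.toNat + (i.toNat - start.toNat) = i.toNat := by omega
  rw [h4, List.getElem?_eq_getElem hlt]
  simp

-- items[i:i+1] = [items[i]]
lemma pv_slice_singleton (items : List (Int × String)) (i : Int)
    (h0 : 0 ≤ i) (hlt : i.toNat < items.length) :
    PySem.List.slice items (some i) (some (i + 1)) = [items[i.toNat]] := by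
  have hd : List.drop i.toNat items = items[i.toNat] :: List.drop (i.toNat + 1) items :=
    List.drop_eq_getElem_cons hlt
  have h3 : (i + 1).toNat - i.toNat = 1 := by omega
  rw [PySem.List.slice_toNat items h0 (by omega), h3, hd]
  rfl

-- the correspondence invariant: after both loops have consumed indices < i,
-- A's state (done, current group = items[start:i]) and B's state (done, start) finish identically
lemma pv_corr (items : List (Int × String)) :
    ∀ (k : Nat) (i : Int) (done : List (List (Int × String))) (start : Int),
      0 ≤ start → start < i → i + k = (items.length : Int) →
      (let s := (items.drop i.toNat).foldl pvStepA (done, PySem.List.slice items (some start) (some i));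
       s.1 ++ [s.2])
      = (let s := (PySem.List.pyRange i (items.length : Int) 1).foldl (pvStepB items) (done, start);
         s.1 ++ [PySem.List.slice items (some s.2) none]) := by
  intro k
  induction k with
  | zero =>
    intro i done start h0 h1 h2
    have hi : i = (items.length : Int) := by omega
    subst hi
    rw [PySem.List.pyRange_one_eq_nil le_rfl]
    have : items.drop (items.length : Int).toNat = [] := by simp
    rw [this]
    simp [pv_slice_full items start h0]
  | succ k ih =>
    intro i done start h0 h1 h2
    have hilt : i < (items.length : Int) := by omega
    have hlt : i.toNat < items.length := by omega
    have him1 : (0:Int) ≤ i - 1 := by omega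
    rw [List.drop_eq_getElem_cons hlt, PySem.List.pyRange_one_cons hilt]
    simp only [List.foldl_cons]
    -- evaluate both loop bodies
    have hA : pvStepA (done, PySem.List.slice items (some start) (some i)) items[i.toNat]
        = if items[i.toNat].1 = items[i.toNat - 1].1 + 1
          then (done, PySem.List.slice items (some start) (some i) ++ [items[i.toNat]])
          else (done ++ [PySem.List.slice items (some start) (some i)], [items[i.toNat]]) := by
      unfold pvStepA
      dsimp only
      have hne : PySem.List.slice items (some start) (some i) ≠ [] := by
        intro h
        have := pv_slice_getLast? items start i h0 h1 (le_of_lt hilt)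
        rw [h] at this
        simp [List.getElem?_eq_getElem (show i.toNat - 1 < items.length by omega)] at this
      rw [PySem.List.pyGetD_neg_one _ _ hne]
      have hgl : (PySem.List.slice items (some start) (some i)).getLast hne = items[i.toNat - 1] := by
        have := pv_slice_getLast? items start i h0 h1 (le_of_lt hilt)
        rw [List.getElem?_eq_getElem (show i.toNat - 1 < items.length by omega)] at this
        exact List.getLast_of_mem_getLast? this
      rw [hgl]
    have hB : pvStepB items (done, start) i
        = if items[i.toNat].1 = items[i.toNat - 1].1 + 1
          then (done, start)
          else (done ++ [PySem.List.slice items (some start) (some i)], i) := by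
      unfold pvStepB
      have e1 : PySem.List.pyGetD items i ((0:Int), "") = items[i.toNat] :=
        PySem.List.pyGetD_eq_getElem items _ (by omega) (by exact_mod_cast hilt)
      have e2 : PySem.List.pyGetD items (i - 1) ((0:Int), "") = items[i.toNat - 1] := by
        rw [PySem.List.pyGetD_eq_getElem items _ him1 (by omega)]
        congr 1
        omega
      rw [e1, e2]
      by_cases h : items[i.toNat].1 = items[i.toNat - 1].1 + 1 <;> simp [h]
    rw [hA, hB]
    by_cases h : items[i.toNat].1 = items[i.toNat - 1].1 + 1
    · rw [if_pos h, if_pos h,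
        pv_slice_extend items start i h0 (le_of_lt h1) hlt]
      have h1toNat : (i + 1).toNat = i.toNat + 1 := by omega
      have := ih (i + 1) done start h0 (by omega) (by omega)
      rw [h1toNat] at this
      exact this
    · rw [if_neg h, if_neg h]
      have hsing : [items[i.toNat]] = PySem.List.slice items (some i) (some (i + 1)) :=
        (pv_slice_singleton items i (by omega) hlt).symm
      rw [hsing]
      have h1toNat : (i + 1).toNat = i.toNat + 1 := by omega
      have := ih (i + 1) (done ++ [PySem.List.slice items (some start) (some i)]) i (by omega) (by omega) (by omega)
      rw [h1toNat] at this
      exact this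

-- ===== VERDICT (by name: the statement is the Claim_ definition above) =====
theorem group_contiguous_py_spec : Claim_equal_group_contiguous_py := by
  intro items _
  unfold Spec_group_contiguous_py
  match items with
  | [] => rfl
  | x :: rest =>
    unfold group_contiguous_py group_contiguous_py_alt
    simp only [List.isEmpty_cons, if_neg (by decide : ¬ (false = true))]
    have hdrop : rest = (x :: rest).drop (1 : Int).toNat := rfl
    have hsl : [x] = PySem.List.slice (x :: rest) (some 0) (some 1) := by
      rw [PySem.List.slice_toNat (x :: rest) le_rfl (by omega)]
      rfl
    have := pv_corr (x :: rest) rest.length 1 [] 0 le_rfl (by omega) (by simp; omega)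
    simp only at this
    rw [hdrop, hsl]
    exact this
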